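-- pv_equiv track=rewrite | github.com/vyaesop/zentani3 | store/views.py | _order_status_timeline
-- ===== SOURCE A (Python) =====
-- ORDER_STATUS_SEQUENCE = ["Pending", "Accepted", "Packed", "On The Way", "Delivered"]
--
-- def _order_status_timeline(status_value):
--     if status_value == "Cancelled":
--         return [
--             {"label": label, "state": "completed" if label == "Pending" else ("cancelled" if label == "Cancelled" else "upcoming")}
--             for label in ["Pending", "Cancelled"]
--         ]
--
--     try:
--         current_index = ORDER_STATUS_SEQUENCE.index(status_value)
--     except ValueError:
--         current_index = 0
--
--     timeline = []
--     for index, label in enumerate(ORDER_STATUS_SEQUENCE):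
--         if index < current_index:
--             state = "completed"
--         elif index == current_index:
--             state = "current"
--         else:
--             state = "upcoming"
--         timeline.append({"label": label, "state": state})
--     return timeline
-- ===== SOURCE B (Python) =====
-- ORDER_STATUS_SEQUENCE = ["Pending", "Accepted", "Packed", "On The Way", "Delivered"]
--
-- def _order_status_timeline(status_value):
--     if status_value == "Cancelled":
--         return [{"label": "Pending", "state": "completed"},
--                 {"label": "Cancelled", "state": "cancelled"}]
--     # state machine: no index arithmetic; the state transitions
--     # completed -> current (when the target label is reached) -> upcoming
--     target = status_value if status_value in ORDER_STATUS_SEQUENCE else ORDER_STATUS_SEQUENCE[0]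
--     timeline = []
--     state = "completed"
--     for label in ORDER_STATUS_SEQUENCE:
--         if label == target:
--             state = "current"
--         elif state == "current":
--             state = "upcoming"
--         timeline.append({"label": label, "state": state})
--     return timeline
-- ===== Notes on version B (the rewrite author's own statement) =====
-- stated objective: alternative
-- what changed: Replaces the index lookup (.index with try/except) and the per-entry three-way integer comparison by a single-pass state machine whose state transitions completed->current->upcoming as the labels stream by, with a membership test choosing the target; no indices are computed at all.
import Mathlib
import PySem

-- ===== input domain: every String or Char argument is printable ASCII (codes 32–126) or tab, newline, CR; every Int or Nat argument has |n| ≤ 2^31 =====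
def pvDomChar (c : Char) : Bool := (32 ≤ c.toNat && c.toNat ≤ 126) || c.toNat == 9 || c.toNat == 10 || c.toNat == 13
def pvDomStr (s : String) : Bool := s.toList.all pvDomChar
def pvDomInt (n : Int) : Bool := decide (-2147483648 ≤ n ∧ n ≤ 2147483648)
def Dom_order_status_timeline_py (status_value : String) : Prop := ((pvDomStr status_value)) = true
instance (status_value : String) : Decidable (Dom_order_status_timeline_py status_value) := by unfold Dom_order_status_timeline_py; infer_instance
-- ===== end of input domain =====

-- B replaces the index lookup and three-way index comparison by a single-pass state machine
-- (completed -> current -> upcoming) over the labels; alternative decomposition, same cost.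

def pvSEQ : List String := ["Pending", "Accepted", "Packed", "On The Way", "Delivered"]

-- ===== PORT A =====
def order_status_timeline_py (status_value : String) : List (List (String × String)) :=
  if status_value == "Cancelled" then
    ["Pending", "Cancelled"].map (fun label =>
      [("label", label),
       ("state", if label == "Pending" then "completed"
                 else if label == "Cancelled" then "cancelled" else "upcoming")])
  else
    -- try: index; except ValueError: 0  →  index? with getD 0
    let current_index : Nat := (PySem.List.index? pvSEQ status_value).getD 0
    (PySem.List.enumerate pvSEQ 0).foldl (fun timeline p =>
      let state := if p.1 < (current_index : Int) then "completed"
                   else if p.1 == (current_index : Int) then "current" else "upcoming"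
      timeline ++ [[("label", p.2), ("state", state)]]) []

-- ===== PORT B =====
def order_status_timeline_py_alt (status_value : String) : List (List (String × String)) :=
  if status_value == "Cancelled" then
    [[("label", "Pending"), ("state", "completed")],
     [("label", "Cancelled"), ("state", "cancelled")]]
  else
    -- ORDER_STATUS_SEQUENCE[0] is "Pending" (nonempty literal list), ported via pyGet? 0
    let target := if pvSEQ.contains status_value then status_value
                  else (PySem.List.pyGet? pvSEQ 0).getD ""
    ((pvSEQ.foldl (fun (acc : List (List (String × String)) × String) label =>
        let state := if label == target then "current"
                     else if acc.2 == "current" then "upcoming" else acc.2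
        (acc.1 ++ [[("label", label), ("state", state)]], state))
      ([], "completed"))).1

-- ===== PRECONDITION & SPEC =====
def Spec_order_status_timeline_py (status_value : String) (out : List (List (String × String))) : Prop := out = order_status_timeline_py_alt status_value
instance (status_value : String) (out : List (List (String × String))) : Decidable (Spec_order_status_timeline_py status_value out) := by unfold Spec_order_status_timeline_py; infer_instance

-- ===== CLAIM (what is proved, stated in full; the proofs are below) =====
def Claim_equal_order_status_timeline_py : Prop := ∀ (status_value : String), Dom_order_status_timeline_py status_value → Spec_order_status_timeline_py status_value (order_status_timeline_py status_value)

-- ===== LEMMAS AND PROOFS =====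

theorem osta_equal (s : String) :
    order_status_timeline_py s = order_status_timeline_py_alt s := by
  by_cases hc : s = "Cancelled"
  · subst hc; decide
  · have hc' : (s == "Cancelled") = false := by simp [hc]
    by_cases hm : s ∈ pvSEQ
    · simp [pvSEQ] at hm
      rcases hm with h | h | h | h | h <;> subst h <;> decide
    · have h0 : PySem.List.index? pvSEQ s = none :=
        (PySem.List.index?_eq_none_iff _ _).mpr hm
      have hcon : pvSEQ.contains s = false := by
        simpa [List.contains_eq_mem] using hm
      unfold order_status_timeline_py order_status_timeline_py_alt
      rw [hc', hcon, h0]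
      simp only [Bool.false_eq_true, if_false]
      decide

-- ===== VERDICT (by name: the statement is the Claim_ definition above) =====
theorem order_status_timeline_py_spec : Claim_equal_order_status_timeline_py := by
  intro s _
  unfold Spec_order_status_timeline_py
  exact osta_equal s
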